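-- pv_equiv track=rewrite | github.com/brownbat/cipher_classifier_factory | ciphers.py | _playfair_decrypt_postprocess
-- ===== SOURCE A (Python) =====
-- def _playfair_decrypt_postprocess(text):
--     result = []
--     i = 0
--     while i < len(text):
--         if i < len(text) - 2 and text[i] == text[i + 2] and text[i + 1] == 'x':
--             result.append(text[i])
--             i += 2  # Skip over the 'x'
--         elif i == len(text) - 1 and text[i] == 'x':
--             i += 1
--         else:
--             result.append(text[i])
--             i += 1
--     return ''.join(result)
-- ===== SOURCE B (Python) =====
-- import re
--
-- def _playfair_decrypt_postprocess(text):
--     # delete each padding 'x' between two equal letters; consuming capture +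
--     # lookahead makes the second duplicate anchor the next match, like A's i += 2
--     out = re.sub(r'(.)x(?=\1)', r'\1', text, flags=re.DOTALL)
--     if out.endswith('x'):
--         out = out[:-1]
--     return out
-- ===== Notes on version B (the rewrite author's own statement) =====
-- stated objective: idiomatic
-- what changed: Replaced A's explicit index loop with three interleaved branches by a single regex substitution (.)x(?=\1) with DOTALL, deleting each padding 'x' between equal characters, followed by stripping one trailing 'x'.
import Mathlib
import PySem

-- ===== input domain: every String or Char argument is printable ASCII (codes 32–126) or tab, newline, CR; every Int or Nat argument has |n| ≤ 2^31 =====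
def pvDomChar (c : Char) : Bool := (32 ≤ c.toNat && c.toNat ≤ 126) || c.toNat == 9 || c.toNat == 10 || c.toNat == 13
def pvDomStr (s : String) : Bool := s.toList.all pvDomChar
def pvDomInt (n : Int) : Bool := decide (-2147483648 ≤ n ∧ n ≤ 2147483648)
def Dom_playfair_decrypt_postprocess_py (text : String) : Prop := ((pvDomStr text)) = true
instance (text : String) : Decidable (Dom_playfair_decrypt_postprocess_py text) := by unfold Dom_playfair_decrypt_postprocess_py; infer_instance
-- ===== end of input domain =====

-- B replaces A's index loop by a regex substitution `(.)x(?=\1)` (ported by hand as the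
-- engine's leftmost non-overlapping scan) plus stripping one trailing 'x'; objective: idiomatic.

-- ===== PORT A =====
-- A's while loop over index i with accumulator `result`; the list getD defaults are
-- unreachable: each branch's guard puts the accessed indices in range, so getD is exact there.
def pvLoopA (cs : List Char) (i : Nat) (result : List Char) : List Char :=
  if i < cs.length then
    if (i : Int) < (cs.length : Int) - 2 ∧ cs.getD i ' ' = cs.getD (i+2) ' '
        ∧ cs.getD (i+1) ' ' = 'x' then
      pvLoopA cs (i+2) (result ++ [cs.getD i ' '])
    else if i = cs.length - 1 ∧ cs.getD i ' ' = 'x' then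
      pvLoopA cs (i+1) result
    else
      pvLoopA cs (i+1) (result ++ [cs.getD i ' '])
  else result
termination_by cs.length - i

def playfair_decrypt_postprocess_py (text : String) : String :=
  String.ofList (pvLoopA text.toList 0 [])

-- ===== PORT B =====
-- Hand port of re.sub(r'(.)x(?=\1)', r'\1', text, flags=re.DOTALL): the regex engine's
-- leftmost non-overlapping scan — at each position, if `(.)x(?=\1)` matches (any char, 'x',
-- lookahead the same char) it consumes the two chars and emits the capture, else it copies
-- one char; exact because the pattern matches exactly the two-char windows tested here.
def pvSubScan : List Char → List Char
  | [] => []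
  | [c] => [c]
  | [c, d] => [c, d]
  | a :: c :: b :: rest =>
      if c = 'x' ∧ a = b then a :: pvSubScan (b :: rest)
      else a :: pvSubScan (c :: b :: rest)
termination_by l => l.length

def playfair_decrypt_postprocess_py_alt (text : String) : String :=
  let out := pvSubScan text.toList
  let out := if PySem.Chars.endswith out ['x']
             then PySem.Chars.slice out none (some (-1)) else out
  String.ofList out

-- ===== PRECONDITION & SPEC =====
def Spec_playfair_decrypt_postprocess_py (text : String) (out : String) : Prop := out = playfair_decrypt_postprocess_py_alt text
instance (text : String) (out : String) : Decidable (Spec_playfair_decrypt_postprocess_py text out) := by unfold Spec_playfair_decrypt_postprocess_py; infer_instance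

-- ===== CLAIM (what is proved, stated in full; the proofs are below) =====
def Claim_equal_playfair_decrypt_postprocess_py : Prop := ∀ (text : String), Dom_playfair_decrypt_postprocess_py text → Spec_playfair_decrypt_postprocess_py text (playfair_decrypt_postprocess_py text)

-- ===== LEMMAS AND PROOFS =====

-- Remove one trailing 'x' (proof-side normal form of B's endswith/slice step).
def pvStrip (l : List Char) : List Char :=
  if l.getLast? = some 'x' then l.dropLast else l

lemma pvSubScan_ne_nil (l : List Char) (h : l ≠ []) : pvSubScan l ≠ [] := by
  match l with
  | [] => exact absurd rfl h
  | [c] => simp [pvSubScan]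
  | [c, d] => simp [pvSubScan]
  | a :: c :: b :: rest =>
      unfold pvSubScan
      split <;> simp

lemma pvStrip_cons (a : Char) (l : List Char) (h : l ≠ []) :
    pvStrip (a :: l) = a :: pvStrip l := by
  obtain ⟨ys, y, rfl⟩ := (List.eq_nil_or_concat l).resolve_left h
  unfold pvStrip
  simp only [List.concat_eq_append]
  have h1 : (a :: (ys ++ [y])).getLast? = some y := by rw [← List.cons_append]; exact List.getLast?_concat
  have h2 : (ys ++ [y]).getLast? = some y := List.getLast?_concat
  have h3 : (a :: (ys ++ [y])).dropLast = a :: ys := by rw [← List.cons_append, List.dropLast_concat]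
  have h4 : (ys ++ [y]).dropLast = ys := List.dropLast_concat ..
  rw [h1, h2, h3, h4]
  by_cases hy : y = 'x' <;> simp [hy]

lemma pvAlt_eq_strip (text : String) :
    playfair_decrypt_postprocess_py_alt text = String.ofList (pvStrip (pvSubScan text.toList)) := by
  unfold playfair_decrypt_postprocess_py_alt pvStrip
  have hend : ∀ l : List Char, PySem.Chars.endswith l ['x'] = true ↔ l.getLast? = some 'x' := by
    intro l
    rw [PySem.Chars.endswith_iff]
    constructor
    · rintro ⟨t, rfl⟩; simp
    · intro h
      rcases List.eq_nil_or_concat l with rfl | ⟨t, x, rfl⟩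
      · simp at h
      · simp at h
        exact ⟨t, by simp [h]⟩
  by_cases h : (pvSubScan text.toList).getLast? = some 'x'
  · simp [(hend _).mpr h, h, PySem.List.slice_to_neg_one]
  · have hfalse : PySem.Chars.endswith (pvSubScan text.toList) ['x'] = false :=
      Bool.eq_false_iff.mpr (fun h' => h ((hend _).mp h'))
    simp [hfalse, h]

lemma pvSubScan_cons3 (a c b : Char) (rest : List Char) :
    pvSubScan (a :: c :: b :: rest) =
      if c = 'x' ∧ a = b then a :: pvSubScan (b :: rest) else a :: pvSubScan (c :: b :: rest) := by
  conv_lhs => rw [pvSubScan]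

lemma pvLoopA_key (cs : List Char) : ∀ n i result, cs.length - i ≤ n →
    pvLoopA cs i result = result ++ pvStrip (pvSubScan (cs.drop i)) := by
  intro n
  induction n with
  | zero =>
      intro i result h
      have hle : cs.length ≤ i := by omega
      rw [pvLoopA, if_neg (by omega), List.drop_of_length_le hle]
      simp [pvSubScan, pvStrip]
  | succ n IH =>
      intro i result h
      by_cases hi : i < cs.length
      · -- s = cs.drop i is nonempty
        have hdrop : cs.drop i ≠ [] := by
          simp [List.drop_eq_nil_iff]; omega
        obtain ⟨a, t, hs⟩ := List.exists_cons_of_ne_nil hdrop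
        have hget : ∀ j : Nat, cs.getD (i+j) ' ' = (cs.drop i).getD j ' ' := by
          intro j
          rw [List.getD_eq_getElem?_getD, List.getD_eq_getElem?_getD, List.getElem?_drop]
        have hga : cs.getD i ' ' = a := by simpa [hs] using hget 0
        have hga' : cs[i]?.getD ' ' = a := by
          rw [← List.getD_eq_getElem?_getD]; exact hga
        have hg1 : cs.getD (i+1) ' ' = t.getD 0 ' ' := by simpa [hs] using hget 1
        have hg2 : cs.getD (i+2) ' ' = t.getD 1 ' ' := by simpa [hs] using hget 2
        have hd1 : cs.drop (i+1) = t := by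
          rw [← List.drop_drop, hs]; rfl
        have hd2 : cs.drop (i+2) = t.drop 1 := by
          rw [← List.drop_drop, hs]; rfl
        have hlen : cs.length = i + 1 + t.length := by
          have := List.length_drop (l := cs) (i := i)
          rw [hs] at this; simp at this; omega
        rw [pvLoopA, if_pos hi]
        match t with
        | [] =>
            -- cs.drop i = [a]: i is the last index
            have hlen' : cs.length = i + 1 := by simpa using hlen
            rw [if_neg (by rintro ⟨hl, -, -⟩; omega)]
            by_cases hax : a = 'x'
            · rw [if_pos ⟨by omega, by rw [hga, hax]⟩]
              rw [IH (i+1) result (by omega), hd1]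
              simp [hs, hax, pvSubScan, pvStrip]
            · rw [if_neg (by rintro ⟨-, hx⟩; rw [hga] at hx; exact hax hx)]
              rw [IH (i+1) (result ++ [cs.getD i ' ']) (by omega), hd1]
              simp [hs, hga', pvSubScan, pvStrip, hax]
        | c :: t' =>
            match t' with
            | [] =>
                -- cs.drop i = [a, c]
                have hlen' : cs.length = i + 2 := by simpa using hlen
                rw [if_neg (by rintro ⟨hl, -, -⟩; omega)]
                rw [if_neg (by rintro ⟨h1, -⟩; omega)]
                rw [IH (i+1) (result ++ [cs.getD i ' ']) (by omega), hd1]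
                by_cases hcx : c = 'x'
                · simp [hs, hga', pvSubScan, pvStrip, hcx]
                · simp [hs, hga', pvSubScan, pvStrip, hcx]
            | b :: rest =>
                -- cs.drop i = a :: c :: b :: rest, length ≥ 3
                have hlen' : cs.length = i + 3 + rest.length := by
                  simp at hlen; omega
                by_cases hm : c = 'x' ∧ a = b
                · rw [if_pos ⟨by omega, by rw [hga, hg2]; simpa using hm.2,
                      by rw [hg1]; simpa using hm.1⟩]
                  rw [IH (i+2) (result ++ [cs.getD i ' ']) (by omega), hd2]
                  have hsub : pvSubScan (cs.drop i) = a :: pvSubScan (b :: rest) := by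
                    rw [hs, pvSubScan_cons3, if_pos hm]
                  rw [hsub, pvStrip_cons a _ (pvSubScan_ne_nil _ (by simp)), hga]
                  simp
                · have hc1 : ¬ ((i : Int) < (cs.length : Int) - 2 ∧ cs.getD i ' ' = cs.getD (i+2) ' '
                      ∧ cs.getD (i+1) ' ' = 'x') := by
                    rintro ⟨-, he, hx⟩
                    rw [hga, hg2] at he; rw [hg1] at hx
                    exact hm ⟨by simpa using hx, by simpa using he⟩
                  rw [if_neg hc1]
                  rw [if_neg (by rintro ⟨h1, -⟩; omega)]
                  rw [IH (i+1) (result ++ [cs.getD i ' ']) (by omega), hd1]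
                  have hsub : pvSubScan (cs.drop i) = a :: pvSubScan (c :: b :: rest) := by
                    rw [hs, pvSubScan_cons3, if_neg hm]
                  rw [hsub, pvStrip_cons a _ (pvSubScan_ne_nil _ (by simp)), hga]
                  simp
      · rw [pvLoopA, if_neg hi, List.drop_of_length_le (by omega)]
        simp [pvSubScan, pvStrip]

-- ===== VERDICT (by name: the statement is the Claim_ definition above) =====
theorem playfair_decrypt_postprocess_py_spec : Claim_equal_playfair_decrypt_postprocess_py := by
  intro text _
  unfold Spec_playfair_decrypt_postprocess_py playfair_decrypt_postprocess_py
  rw [pvAlt_eq_strip, pvLoopA_key text.toList text.toList.length 0 [] (by omega)]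
  simp
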